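-- pv_equiv track=rewrite | github.com/akiracrying/DepReach | scripts/reachability.py | is_func_reachable
-- ===== SOURCE A (Python) =====
-- def is_func_reachable(start_funcs: set[str], target_func: str, call_graph: dict[str, set[str]]) -> bool:
--     """
--     Проверяет, достижима ли уязвимая функция target_func из любой функции в start_funcs.
--     """
--     visited = set()
--     stack = list(start_funcs)
--
--     while stack:
--         current = stack.pop()
--         if current == target_func:
--             return True
--         if current not in visited:
--             visited.add(current)
--             stack.extend(call_graph.get(current, []))
--
--     return False
-- ===== SOURCE B (Python) =====
-- def is_func_reachable(start_funcs: set[str], target_func: str, call_graph: dict[str, set[str]]) -> bool: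
--     """Level-synchronous BFS: expand whole frontiers at once instead of popping one node
--     from a stack; the frontier is a deduplicated set, so no node is ever queued twice."""
--     visited = set()
--     frontier = set(start_funcs)
--     while frontier:
--         if target_func in frontier:
--             return True
--         visited |= frontier
--         frontier = {n for f in frontier for n in call_graph.get(f, [])} - visited
--     return False
-- ===== Notes on version B (the rewrite author's own statement) =====
-- stated objective: alternative
-- what changed: A's one-node-at-a-time LIFO worklist (a stack that may hold many duplicates of a node) is replaced by a level-synchronous BFS that expands a whole deduplicated frontier set per iteration and subtracts the visited set once per level.
import Mathlib
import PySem

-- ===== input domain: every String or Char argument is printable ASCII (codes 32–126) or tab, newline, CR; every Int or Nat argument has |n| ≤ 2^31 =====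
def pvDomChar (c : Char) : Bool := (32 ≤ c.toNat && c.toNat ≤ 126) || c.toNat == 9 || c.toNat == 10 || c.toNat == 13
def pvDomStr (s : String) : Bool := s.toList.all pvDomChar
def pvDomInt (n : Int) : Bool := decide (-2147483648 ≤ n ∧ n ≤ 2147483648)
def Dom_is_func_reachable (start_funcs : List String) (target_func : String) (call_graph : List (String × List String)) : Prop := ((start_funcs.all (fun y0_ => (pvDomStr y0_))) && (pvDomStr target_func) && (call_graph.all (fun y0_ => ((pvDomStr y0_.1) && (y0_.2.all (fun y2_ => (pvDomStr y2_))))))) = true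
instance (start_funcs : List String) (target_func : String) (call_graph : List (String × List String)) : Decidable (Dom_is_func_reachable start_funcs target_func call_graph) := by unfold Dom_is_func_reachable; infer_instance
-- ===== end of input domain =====

-- B replaces A's one-node-at-a-time LIFO stack (which can hold duplicates) by a
-- level-synchronous BFS over deduplicated frontier sets; objective: alternative.

-- call_graph.get(x, []) — first-match association-list lookup, [] when the key is absent
def pvNbrs (g : List (String × List String)) (x : String) : List String :=
  PySem.Dict.getD (PySem.Dict.mk g) x []

-- every string occurring in the graph (keys and values); used only as a termination measure
def pvNodes (g : List (String × List String)) : List String :=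
  g.foldr (fun p acc => p.1 :: (p.2 ++ acc)) []

lemma pvNbrs_subset (g : List (String × List String)) (x y : String)
    (h : y ∈ pvNbrs g x) : y ∈ pvNodes g := by
  induction g with
  | nil => simp [pvNbrs, PySem.Dict.getD, PySem.Dict.get?] at h ⊢
  | cons p rest ih =>
    rw [pvNbrs, PySem.Dict.getD_eq_get?_getD, PySem.Dict.get?_mk_cons] at h
    by_cases hk : p.1 == x
    · simp [hk] at h
      simp [pvNodes]
      exact Or.inr (Or.inl h)
    · simp [hk] at h
      have := ih (by rw [pvNbrs, PySem.Dict.getD_eq_get?_getD]; exact h)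
      simp [pvNodes] at this ⊢
      tauto

lemma pvNbrs_of_not_mem (g : List (String × List String)) (x : String)
    (h : x ∉ pvNodes g) : pvNbrs g x = [] := by
  induction g with
  | nil => simp [pvNbrs, PySem.Dict.getD, PySem.Dict.get?]
  | cons p rest ih =>
    simp [pvNodes] at h
    rw [pvNbrs, PySem.Dict.getD_eq_get?_getD, PySem.Dict.get?_mk_cons]
    have hk : (p.1 == x) = false := by
      simp only [beq_eq_false_iff_ne]; intro he; exact h.1 he.symm
    rw [hk]
    simp only [Bool.false_eq_true, if_false]
    have := ih (by simp [pvNodes]; tauto)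
    rw [pvNbrs, PySem.Dict.getD_eq_get?_getD] at this
    exact this

-- ===== PORT A =====
-- while stack: current = stack.pop(); … ; stack.extend(call_graph.get(current, []))
def pvALoop (g : List (String × List String)) (target : String)
    (visited : PySem.Set String) (stack : List String) : Bool :=
  if hne : stack = [] then
    false
  else
    let current := stack.getLast hne
    let rest := stack.dropLast
    if current == target then true
    else if PySem.Set.contains visited current then
      pvALoop g target visited rest
    else
      pvALoop g target (PySem.Set.add visited current) (rest ++ pvNbrs g current)
termination_by (((pvNodes g).toFinset \ visited.toFinset).card, stack.length)
decreasing_by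
  · apply Prod.Lex.right
    have h0 : stack.length ≠ 0 := by simpa [List.length_eq_zero_iff] using hne
    simp [List.length_dropLast]
    omega
  · rename_i _hct hcv
    have hnv : stack.getLast hne ∉ visited := by
      intro hm
      exact hcv ((PySem.Set.contains_iff _ _).mpr hm)
    by_cases hm : stack.getLast hne ∈ pvNodes g
    · apply Prod.Lex.left
      refine Finset.card_lt_card ((Finset.ssubset_iff_of_subset ?_).mpr ?_)
      · intro a ha
        rw [PySem.Set.add_of_not_mem hnv, List.toFinset_append] at ha
        simp only [Finset.mem_sdiff, Finset.mem_union, List.mem_toFinset] at ha ⊢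
        exact ⟨ha.1, fun hv => ha.2 (Or.inl hv)⟩
      · refine ⟨stack.getLast hne, ?_, ?_⟩
        · simp only [Finset.mem_sdiff, List.mem_toFinset]
          exact ⟨hm, hnv⟩
        · rw [PySem.Set.add_of_not_mem hnv, List.toFinset_append]
          simp
    · have hnbr : pvNbrs g (stack.getLast hne) = [] := pvNbrs_of_not_mem _ _ hm
      have heq : (pvNodes g).toFinset \ (PySem.Set.add visited (stack.getLast hne)).toFinset
          = (pvNodes g).toFinset \ visited.toFinset := by
        rw [PySem.Set.add_of_not_mem hnv, List.toFinset_append]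
        ext a
        simp only [Finset.mem_sdiff, Finset.mem_union, List.mem_toFinset]
        constructor
        · rintro ⟨h1, h2⟩
          exact ⟨h1, fun hv => h2 (Or.inl hv)⟩
        · rintro ⟨h1, h2⟩
          refine ⟨h1, fun hc => ?_⟩
          rcases hc with hc | hc
          · exact h2 hc
          · simp at hc
            exact hm (hc ▸ h1)
      rw [heq, hnbr, List.append_nil]
      apply Prod.Lex.right
      have h0 : stack.length ≠ 0 := by simpa [List.length_eq_zero_iff] using hne
      simp [List.length_dropLast]
      omega

-- ===== PORT B =====
-- while frontier: if target in frontier: return True; visited |= frontier;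
--                 frontier = {n for f in frontier for n in call_graph.get(f, [])} - visited
def pvBLoop (g : List (String × List String)) (target : String)
    (visited : PySem.Set String) (frontier : PySem.Set String)
    (hdisj : ∀ x ∈ frontier, x ∉ visited) : Bool :=  -- invariant: the frontier is always fresh
  if frontier = [] then
    false
  else if PySem.Set.contains frontier target then
    true
  else
    let visited' := PySem.Set.union visited frontier
    let frontier' := PySem.Set.diff (PySem.Set.ofList (frontier.flatMap (pvNbrs g))) visited'
    pvBLoop g target visited' frontier'
      (fun x hx => ((PySem.Set.mem_diff _ _ _).mp hx).2)
termination_by (((pvNodes g).toFinset ∪ frontier.toFinset) \ visited.toFinset).card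
decreasing_by
  rename_i hne _hnt
  refine Finset.card_lt_card ((Finset.ssubset_iff_of_subset ?_).mpr ?_)
  · intro a ha
    simp only [Finset.mem_sdiff, Finset.mem_union, List.mem_toFinset] at ha ⊢
    obtain ⟨hU, hv'⟩ := ha
    have hnv : a ∉ visited := fun hv => hv' ((PySem.Set.mem_union _ _ _).mpr (Or.inl hv))
    refine ⟨?_, hnv⟩
    rcases hU with h | h
    · exact Or.inl h
    · have h1 := ((PySem.Set.mem_diff _ _ _).mp h).1
      obtain ⟨f, _, hfn⟩ := List.mem_flatMap.mp ((PySem.Set.mem_ofList _ _).mp h1)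
      exact Or.inl (pvNbrs_subset g f a hfn)
  · obtain ⟨f, hf⟩ := List.exists_mem_of_ne_nil frontier hne
    refine ⟨f, ?_, ?_⟩
    · simp only [Finset.mem_sdiff, Finset.mem_union, List.mem_toFinset]
      exact ⟨Or.inr hf, hdisj f hf⟩
    · simp only [Finset.mem_sdiff, Finset.mem_union, List.mem_toFinset, not_and, not_not]
      intro _
      exact (PySem.Set.mem_union _ _ _).mpr (Or.inr hf)

def is_func_reachable (start_funcs : List String) (target_func : String) (call_graph : List (String × List String)) : Bool :=
  pvALoop call_graph target_func PySem.Set.empty start_funcs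

def is_func_reachable_alt (start_funcs : List String) (target_func : String) (call_graph : List (String × List String)) : Bool :=
  pvBLoop call_graph target_func PySem.Set.empty (PySem.Set.ofList start_funcs)
    (fun x _ hx => by simp [PySem.Set.empty] at hx)

-- ===== PRECONDITION & SPEC =====
def Spec_is_func_reachable (start_funcs : List String) (target_func : String) (call_graph : List (String × List String)) (out : Bool) : Prop := out = is_func_reachable_alt start_funcs target_func call_graph
instance (start_funcs : List String) (target_func : String) (call_graph : List (String × List String)) (out : Bool) : Decidable (Spec_is_func_reachable start_funcs target_func call_graph out) := by unfold Spec_is_func_reachable; infer_instance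

-- ===== CLAIM (what is proved, stated in full; the proofs are below) =====
def Claim_equal_is_func_reachable : Prop := ∀ (start_funcs : List String) (target_func : String) (call_graph : List (String × List String)), Dom_is_func_reachable start_funcs target_func call_graph → Spec_is_func_reachable start_funcs target_func call_graph (is_func_reachable start_funcs target_func call_graph)

-- ===== LEMMAS AND PROOFS =====

-- reachability in the call graph: the common semantics both loops compute
inductive pvReach (g : List (String × List String)) : String → String → Prop
  | refl (x : String) : pvReach g x x
  | step {x y z : String} : y ∈ pvNbrs g x → pvReach g y z → pvReach g x z

lemma pvReach_closed {g : List (String × List String)} {V : List String}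
    (hcl : ∀ v ∈ V, ∀ n ∈ pvNbrs g v, n ∈ V) {s t : String}
    (hs : s ∈ V) (h : pvReach g s t) : t ∈ V := by
  induction h with
  | refl => exact hs
  | step hy _ ih => exact ih (hcl _ hs _ hy)

lemma pvALoop_sound (g : List (String × List String)) (target : String)
    (visited : PySem.Set String) (stack : List String) :
    pvALoop g target visited stack = true → ∃ s ∈ stack, pvReach g s target := by
  fun_induction pvALoop g target visited stack
  case case1 => simp
  case case2 visited stack hne current hT =>
    intro _
    exact ⟨_, List.getLast_mem hne, by rw [show stack.getLast hne = target from eq_of_beq hT]; exact pvReach.refl target⟩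
  case case3 visited stack hne current rest hT hv ih =>
    intro h
    obtain ⟨s, hs, hr⟩ := ih h
    exact ⟨s, (List.dropLast_sublist _).mem hs, hr⟩
  case case4 visited stack hne current rest hT hv ih =>
    intro h
    obtain ⟨s, hs, hr⟩ := ih h
    rcases List.mem_append.mp hs with hs | hs
    · exact ⟨s, (List.dropLast_sublist _).mem hs, hr⟩
    · exact ⟨_, List.getLast_mem hne, pvReach.step hs hr⟩

lemma pvALoop_complete (g : List (String × List String)) (target : String)
    (visited : PySem.Set String) (stack : List String) :
    target ∉ visited →
    (∀ v ∈ visited, ∀ n ∈ pvNbrs g v, n ∈ visited ∨ n ∈ stack) →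
    (∃ s, (s ∈ visited ∨ s ∈ stack) ∧ pvReach g s target) →
    pvALoop g target visited stack = true := by
  fun_induction pvALoop g target visited stack
  case case1 =>
    rintro ht hcl ⟨s, hs, hr⟩
    exfalso
    refine ht (pvReach_closed (fun v hv n hn => ?_) ?_ hr)
    · rcases hcl v hv n hn with h | h
      · exact h
      · simp at h
    · rcases hs with h | h
      · exact h
      · simp at h
  case case2 => intro _ _ _; rfl
  case case3 visited stack hne current rest hT hv ih =>
    intro ht hcl hex
    have hvmem : stack.getLast hne ∈ visited := (PySem.Set.contains_iff _ _).mp hv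
    have hsplit : ∀ x, x ∈ stack ↔ x ∈ stack.dropLast ∨ x = stack.getLast hne := by
      intro x
      conv_lhs => rw [← List.dropLast_append_getLast hne]
      simp
    refine ih ht (fun v hvv n hn => ?_) ?_
    · rcases hcl v hvv n hn with h | h
      · exact Or.inl h
      · rcases (hsplit n).mp h with h | h
        · exact Or.inr h
        · exact Or.inl (h ▸ hvmem)
    · obtain ⟨s, hs, hr⟩ := hex
      refine ⟨s, ?_, hr⟩
      rcases hs with h | h
      · exact Or.inl h
      · rcases (hsplit s).mp h with h | h
        · exact Or.inr h
        · exact Or.inl (h ▸ hvmem)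
  case case4 visited stack hne current rest hT hv ih =>
    intro ht hcl hex
    have hsplit : ∀ x, x ∈ stack ↔ x ∈ stack.dropLast ∨ x = stack.getLast hne := by
      intro x
      conv_lhs => rw [← List.dropLast_append_getLast hne]
      simp
    have htc : target ≠ stack.getLast hne := by
      intro h
      exact hT (by rw [h]; exact beq_self_eq_true _)
    refine ih ?_ (fun v hvv n hn => ?_) ?_
    · intro h
      rcases (PySem.Set.mem_add _ _ _).mp h with h | h
      · exact ht h
      · exact htc h
    · rcases (PySem.Set.mem_add _ _ _).mp hvv with h | h
      · rcases hcl v h n hn with h2 | h2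
        · exact Or.inl ((PySem.Set.mem_add _ _ _).mpr (Or.inl h2))
        · rcases (hsplit n).mp h2 with h2 | h2
          · exact Or.inr (List.mem_append.mpr (Or.inl h2))
          · exact Or.inl ((PySem.Set.mem_add _ _ _).mpr (Or.inr h2))
      · exact Or.inr (List.mem_append.mpr (Or.inr (h ▸ hn)))
    · obtain ⟨s, hs, hr⟩ := hex
      refine ⟨s, ?_, hr⟩
      rcases hs with h | h
      · exact Or.inl ((PySem.Set.mem_add _ _ _).mpr (Or.inl h))
      · rcases (hsplit s).mp h with h | h
        · exact Or.inr (List.mem_append.mpr (Or.inl h))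
        · exact Or.inl ((PySem.Set.mem_add _ _ _).mpr (Or.inr h))

lemma pvBLoop_sound (g : List (String × List String)) (target : String)
    (visited frontier : PySem.Set String) (hd : ∀ x ∈ frontier, x ∉ visited) :
    pvBLoop g target visited frontier hd = true → ∃ s ∈ frontier, pvReach g s target := by
  fun_induction pvBLoop g target visited frontier hd
  case case1 => simp
  case case2 visited frontier hd hne hT =>
    intro _
    exact ⟨target, (PySem.Set.contains_iff _ _).mp hT, pvReach.refl target⟩
  case case3 visited frontier hd hne hT visitedN frontierN ih =>
    intro h
    obtain ⟨s, hs, hr⟩ := ih h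
    have h1 := ((PySem.Set.mem_diff _ _ _).mp hs).1
    obtain ⟨f, hf, hfn⟩ := List.mem_flatMap.mp ((PySem.Set.mem_ofList _ _).mp h1)
    exact ⟨f, hf, pvReach.step hfn hr⟩

lemma pvBLoop_complete (g : List (String × List String)) (target : String)
    (visited frontier : PySem.Set String) (hd : ∀ x ∈ frontier, x ∉ visited) :
    target ∉ visited →
    (∀ v ∈ visited, ∀ n ∈ pvNbrs g v, n ∈ visited ∨ n ∈ frontier) →
    (∃ s, (s ∈ visited ∨ s ∈ frontier) ∧ pvReach g s target) →
    pvBLoop g target visited frontier hd = true := by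
  fun_induction pvBLoop g target visited frontier hd
  case case1 =>
    rintro ht hcl ⟨s, hs, hr⟩
    exfalso
    refine ht (pvReach_closed (fun v hv n hn => ?_) ?_ hr)
    · rcases hcl v hv n hn with h | h
      · exact h
      · simp at h
    · rcases hs with h | h
      · exact h
      · simp at h
  case case2 => intro _ _ _; rfl
  case case3 visited frontier hd hne hT visitedN frontierN ih =>
    intro ht hcl hex
    have hnt : target ∉ frontier := fun h => hT ((PySem.Set.contains_iff _ _).mpr h)
    refine ih ?_ (fun v hvv n hn => ?_) ?_
    · intro h
      rcases (PySem.Set.mem_union _ _ _).mp h with h | h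
      · exact ht h
      · exact hnt h
    · rcases (PySem.Set.mem_union _ _ _).mp hvv with h | h
      · rcases hcl v h n hn with h2 | h2
        · exact Or.inl ((PySem.Set.mem_union _ _ _).mpr (Or.inl h2))
        · exact Or.inl ((PySem.Set.mem_union _ _ _).mpr (Or.inr h2))
      · by_cases hnv : n ∈ PySem.Set.union visited frontier
        · exact Or.inl hnv
        · refine Or.inr ((PySem.Set.mem_diff _ _ _).mpr ⟨?_, hnv⟩)
          exact (PySem.Set.mem_ofList _ _).mpr (List.mem_flatMap.mpr ⟨v, h, hn⟩)
    · obtain ⟨s, hs, hr⟩ := hex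
      refine ⟨s, ?_, hr⟩
      rcases hs with h | h
      · exact Or.inl ((PySem.Set.mem_union _ _ _).mpr (Or.inl h))
      · exact Or.inl ((PySem.Set.mem_union _ _ _).mpr (Or.inr h))

-- ===== VERDICT (by name: the statement is the Claim_ definition above) =====
theorem is_func_reachable_spec : Claim_equal_is_func_reachable := by
  intro starts target g _
  unfold Spec_is_func_reachable
  unfold is_func_reachable is_func_reachable_alt
  by_cases hB : pvBLoop g target PySem.Set.empty (PySem.Set.ofList starts)
      (fun x _ hx => by simp [PySem.Set.empty] at hx) = true
  · rw [hB]
    obtain ⟨s, hs, hr⟩ := pvBLoop_sound _ _ _ _ _ hB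
    exact pvALoop_complete _ _ _ _ (by simp [PySem.Set.empty])
      (by simp [PySem.Set.empty])
      ⟨s, Or.inr ((PySem.Set.mem_ofList _ _).mp hs), hr⟩
  · rw [Bool.not_eq_true] at hB
    rw [hB, Bool.eq_false_iff]
    intro hA
    obtain ⟨s, hs, hr⟩ := pvALoop_sound _ _ _ _ hA
    have := pvBLoop_complete g target PySem.Set.empty (PySem.Set.ofList starts)
      (fun x _ hx => by simp [PySem.Set.empty] at hx)
      (by simp [PySem.Set.empty]) (by simp [PySem.Set.empty])
      ⟨s, Or.inr ((PySem.Set.mem_ofList _ _).mpr hs), hr⟩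
    rw [hB] at this; exact Bool.false_ne_true this
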